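-- pv_equiv track=rewrite | github.com/ldydek/AGH-ASD | 500+ algorithms/Arrays/ex047.py | ex047
-- ===== SOURCE A (Python) =====
-- def ex047(tab):
--     n, ctr = len(tab), 0
--     mini = -10**10
--     solution = 1
--     for x in range(n):
--         if tab[x] < 0:
--             ctr += 1
--             mini = max(mini, tab[x])
--     for x in range(n):
--         if tab[x] != 0:
--             solution *= tab[x]
--     if ctr % 2:
--         solution //= mini
--     return solution
-- ===== SOURCE B (Python) =====
-- def ex047(tab):
--     # Single left-to-right pass: p = product of nonzeros seen; q = product of
--     # nonzeros seen omitting one occurrence of the largest negative seen so far;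
--     # odd = parity of negatives. Return q when the negative count is odd, else p.
--     p = 1
--     q = 1
--     odd = False
--     have_neg = False
--     best = 0
--     for x in tab:
--         if x == 0:
--             continue
--         if x < 0:
--             odd = not odd
--             if not have_neg or best <= x:
--                 have_neg = True
--                 q = p
--                 best = x
--             else:
--                 q *= x
--         else:
--             q *= x
--         p *= x
--     return q if odd else p
-- ===== Notes on version B (the rewrite author's own statement) =====
-- stated objective: alternative
-- what changed: B is a single left-to-right pass maintaining two running products (the full nonzero product and a deferred product that omits one occurrence of the largest negative seen so far) plus a parity flag, replacing A's two index loops, sentinel max tracking and final floor division.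
import Mathlib
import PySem

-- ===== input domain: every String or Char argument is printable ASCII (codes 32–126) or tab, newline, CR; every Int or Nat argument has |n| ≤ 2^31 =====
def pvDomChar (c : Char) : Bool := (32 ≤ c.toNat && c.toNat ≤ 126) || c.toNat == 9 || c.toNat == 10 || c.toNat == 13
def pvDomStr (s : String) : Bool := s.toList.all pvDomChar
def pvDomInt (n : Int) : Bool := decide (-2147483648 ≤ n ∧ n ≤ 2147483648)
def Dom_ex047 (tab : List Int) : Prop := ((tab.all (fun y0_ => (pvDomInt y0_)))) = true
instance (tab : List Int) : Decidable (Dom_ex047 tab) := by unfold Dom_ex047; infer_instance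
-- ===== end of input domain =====

-- B replaces A's two index loops, max tracking and floor division by one pass with two running products; objective: alternative.

-- ===== PORT A =====
-- first loop of A: the pair (ctr, mini)
def pvA_ctrMini (tab : List Int) : Int × Int :=
  (PySem.List.pyRange 0 (tab.length : Int) 1).foldl
    (fun (st : Int × Int) x =>
      if PySem.List.pyGetD tab x 0 < 0 then (st.1 + 1, max st.2 (PySem.List.pyGetD tab x 0)) else st)
    (0, -(10 ^ 10))

-- second loop of A: solution (product of the nonzeros)
def pvA_solution (tab : List Int) : Int :=
  (PySem.List.pyRange 0 (tab.length : Int) 1).foldl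
    (fun s x => if PySem.List.pyGetD tab x 0 ≠ 0 then s * PySem.List.pyGetD tab x 0 else s) 1

def ex047 (tab : List Int) : Int :=
  if PySem.Int.mod (pvA_ctrMini tab).1 2 ≠ 0 then
    PySem.Int.floordiv (pvA_solution tab) (pvA_ctrMini tab).2
  else pvA_solution tab

-- ===== PORT B =====
-- state: (p, q, odd, best): p = product of nonzeros so far; q = that product with one
-- occurrence of the largest negative so far deferred; best = some largest-negative (none yet)
def pvB_step (st : Int × Int × Bool × Option Int) (x : Int) : Int × Int × Bool × Option Int :=
  if x = 0 then st
  else if x < 0 then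
    match st.2.2.2 with
    | none => (st.1 * x, st.1, !st.2.2.1, some x)
    | some b =>
        if b ≤ x then (st.1 * x, st.1, !st.2.2.1, some x)
        else (st.1 * x, st.2.1 * x, !st.2.2.1, some b)
  else (st.1 * x, st.2.1 * x, st.2.2.1, st.2.2.2)

def pvB_run (tab : List Int) : Int × Int × Bool × Option Int :=
  tab.foldl pvB_step (1, 1, false, none)

def ex047_alt (tab : List Int) : Int :=
  if (pvB_run tab).2.2.1 then (pvB_run tab).2.1 else (pvB_run tab).1

-- ===== PRECONDITION & SPEC =====
def Spec_ex047 (tab : List Int) (out : Int) : Prop := out = ex047_alt tab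
instance (tab : List Int) (out : Int) : Decidable (Spec_ex047 tab out) := by unfold Spec_ex047; infer_instance

-- ===== CLAIM (what is proved, stated in full; the proofs are below) =====
def Claim_equal_ex047 : Prop := ∀ (tab : List Int), Dom_ex047 tab → Spec_ex047 tab (ex047 tab)

-- ===== LEMMAS AND PROOFS =====

-- A's first loop: count of negatives and running max over the negatives
theorem pv_loop1 (l : List Int) (c m : Int) :
    l.foldl (fun (st : Int × Int) t => if t < 0 then (st.1 + 1, max st.2 t) else st) (c, m)
    = (c + (l.filter (fun x => decide (x < 0))).length,
       (l.filter (fun x => decide (x < 0))).foldl max m) := by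
  induction l generalizing c m with
  | nil => simp
  | cons h t ih =>
      by_cases hh : h < 0 <;> simp [hh, ih] <;> omega

-- A's second loop: product of the nonzeros
theorem pv_loop2 (l : List Int) (s : Int) :
    l.foldl (fun s t => if t ≠ 0 then s * t else s) s
    = s * (l.filter (fun x => decide (x ≠ 0))).prod := by
  induction l generalizing s with
  | nil => simp
  | cons h t ih =>
      rw [List.foldl_cons, ih]
      by_cases hh : h = 0 <;> simp [hh, mul_assoc]

theorem pv_bridge {σ : Type} (xs : List Int) (f : σ → Int → σ) (init : σ) :
    (PySem.List.pyRange 0 (xs.length : Int) 1).foldl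
      (fun acc j => f acc (PySem.List.pyGetD xs j 0)) init = xs.foldl f init :=
  PySem.List.foldl_pyRange_zero_pyGetD' (xs := xs) (f := f) (init := init) (d := 0)

theorem pv_foldl_max_ub (l : List Int) (c : Int) (h : ∀ y ∈ l, y ≤ c) :
    l.foldl max c = c := by
  induction l generalizing c with
  | nil => rfl
  | cons a t ih =>
      rw [List.foldl_cons, max_eq_left (h a (by simp))]
      exact ih c fun y hy => h y (by simp [hy])

theorem pv_foldl_max_of_max (l : List Int) (c b : Int) (hb : b ∈ l)
    (hub : ∀ y ∈ l, y ≤ b) (hc : c ≤ b) : l.foldl max c = b := by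
  induction l generalizing c with
  | nil => simp at hb
  | cons a t ih =>
      rw [List.foldl_cons]
      by_cases hbt : b ∈ t
      · exact ih (max c a) hbt (fun y hy => hub y (by simp [hy]))
          (max_le hc (hub a (by simp)))
      · have hab : b = a := by
          rcases List.mem_cons.mp hb with h | h
          · exact h
          · exact absurd h hbt
        subst hab
        rw [max_eq_right hc]
        exact pv_foldl_max_ub t b fun y hy => hub y (by simp [hy])

-- the invariant of B's single pass
theorem pv_run (l : List Int) :
    (pvB_run l).1 = (l.filter (fun x => decide (x ≠ 0))).prod ∧
    (pvB_run l).2.2.1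
      = decide ((l.filter (fun x => decide (x < 0))).length % 2 = 1) ∧
    (match (pvB_run l).2.2.2 with
     | none => (l.filter (fun x => decide (x < 0))) = [] ∧
         (pvB_run l).1 = (pvB_run l).2.1
     | some b => (b ∈ l.filter (fun x => decide (x < 0)) ∧
           ∀ y ∈ l.filter (fun x => decide (x < 0)), y ≤ b) ∧
         (pvB_run l).1
           = (pvB_run l).2.1 * b) := by
  induction l using List.reverseRecOn with
  | nil => simp [pvB_run]
  | append_singleton t x ih =>
      obtain ⟨ihp, iho, ihm⟩ := ih
      have hrun : pvB_run (t ++ [x]) = pvB_step (pvB_run t) x := by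
        unfold pvB_run
        rw [List.foldl_append, List.foldl_cons, List.foldl_nil]
      rw [hrun, List.filter_append, List.filter_append]
      set st := pvB_run t with hst
      by_cases hx0 : x = 0
      · have hf1 : [x].filter (fun x => decide (x ≠ 0)) = [] := by simp [hx0]
        have hf2 : [x].filter (fun x => decide (x < 0)) = [] := by simp [hx0]
        have hstep : pvB_step st x = st := by simp [pvB_step, hx0]
        rw [hf1, hf2, List.append_nil, List.append_nil, hstep]
        exact ⟨ihp, iho, ihm⟩
      · by_cases hxneg : x < 0
        · have hf1 : [x].filter (fun x => decide (x ≠ 0)) = [x] := by simp [hx0]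
          have hf2 : [x].filter (fun x => decide (x < 0)) = [x] := by simp [hxneg]
          rw [hf1, hf2]
          have hpar : ∀ n : Nat, decide ((n + 1) % 2 = 1) = !decide (n % 2 = 1) := by
            intro n; rcases Nat.mod_two_eq_zero_or_one n with h | h <;> simp [Nat.add_mod, h]
          simp only [pvB_step, if_neg hx0, if_pos hxneg]
          cases hm : st.2.2.2 with
          | none =>
              rw [hm] at ihm
              obtain ⟨hnegnil, hpq⟩ := ihm
              refine ⟨by simp [ihp, List.prod_append], ?_, ?_⟩
              · simp [iho, hnegnil]
              · refine ⟨⟨by simp, ?_⟩, rfl⟩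
                intro y hy
                rw [hnegnil] at hy
                simp at hy
                omega
          | some b =>
              rw [hm] at ihm
              obtain ⟨⟨hbmem, hbub⟩, hpq⟩ := ihm
              by_cases hbx : b ≤ x
              · simp only [if_pos hbx]
                refine ⟨by simp [ihp, List.prod_append], by simp [iho, hpar], ?_, ?_⟩
                · refine ⟨by simp, ?_⟩
                  intro y hy
                  rcases List.mem_append.mp hy with h | h
                  · exact le_trans (hbub y h) hbx
                  · simp at h; omega
                · trivial
              · simp only [if_neg hbx]
                refine ⟨by simp [ihp, List.prod_append], by simp [iho, hpar], ?_, ?_⟩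
                · refine ⟨by simp [hbmem], ?_⟩
                  intro y hy
                  rcases List.mem_append.mp hy with h | h
                  · exact hbub y h
                  · simp at h; omega
                · rw [hpq]; ring
        · have hf1 : [x].filter (fun x => decide (x ≠ 0)) = [x] := by simp [hx0]
          have hf2 : [x].filter (fun x => decide (x < 0)) = [] := by simp [hxneg]
          rw [hf1, hf2, List.append_nil]
          simp only [pvB_step, if_neg hx0, if_neg hxneg]
          refine ⟨by simp [ihp, List.prod_append], by simp [iho], ?_⟩
          cases hm : st.2.2.2 with
          | none =>
              rw [hm] at ihm
              exact ⟨ihm.1, by simp [ihm.2]⟩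
          | some b =>
              rw [hm] at ihm
              exact ⟨ihm.1, by rw [ihm.2]; ring⟩

theorem ex047_spec : Claim_equal_ex047 := by
  intro tab hdom
  unfold Spec_ex047 ex047 ex047_alt
  set neg := tab.filter (fun x => decide (x < 0)) with hneg
  set nz := tab.filter (fun x => decide (x ≠ 0)) with hnz
  have hst : pvA_ctrMini tab = ((neg.length : Int), neg.foldl max (-(10 ^ 10))) := by
    unfold pvA_ctrMini
    rw [pv_bridge tab (fun (st : Int × Int) t => if t < 0 then (st.1 + 1, max st.2 t) else st)
        ((0 : Int), -(10 : Int) ^ 10)]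
    rw [pv_loop1 tab 0 (-(10 ^ 10)), zero_add, hneg]
  have hsol : pvA_solution tab = nz.prod := by
    unfold pvA_solution
    rw [pv_bridge tab (fun s t => if t ≠ 0 then s * t else s) (1 : Int)]
    rw [pv_loop2 tab 1, one_mul, hnz]
  have hge : ∀ x ∈ neg, -(10 ^ 10) ≤ x := by
    intro x hx
    rw [hneg] at hx
    have hxt : x ∈ tab := List.mem_of_mem_filter hx
    have := (List.all_eq_true.mp hdom) x hxt
    simp [pvDomInt] at this
    omega
  have hltneg : ∀ x ∈ neg, x < 0 := by
    intro x hx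
    rw [hneg] at hx
    simpa using List.of_mem_filter hx
  have hmod : PySem.Int.mod ((neg.length : Int)) 2 = ((neg.length % 2 : Nat) : Int) := by
    rw [PySem.Int.mod_eq_emod_of_pos (by norm_num)]
    omega
  obtain ⟨hp, ho, hm⟩ := pv_run tab
  rw [← hnz] at hp
  rw [← hneg] at ho
  simp only [← hneg] at hm
  set st := pvB_run tab with hstB
  rw [hst, hsol]
  by_cases hodd : neg.length % 2 = 1
  · have hctr : PySem.Int.mod ((neg.length : Int)) 2 ≠ 0 := by
      rw [hmod, hodd]; norm_num
    rw [if_pos hctr]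
    have hob : st.2.2.1 = true := by rw [ho]; simp [hodd]
    rw [hob, if_pos rfl]
    cases hmm : st.2.2.2 with
    | none =>
        rw [hmm] at hm
        obtain ⟨hnil, _⟩ := hm
        rw [hnil] at hodd; simp at hodd
    | some b =>
        rw [hmm] at hm
        obtain ⟨⟨hbmem, hbub⟩, hpq⟩ := hm
        have hbneg : b < 0 := hltneg b hbmem
        have hmini : neg.foldl max (-(10 ^ 10)) = b :=
          pv_foldl_max_of_max neg _ b hbmem hbub (hge b hbmem)
        rw [hmini, ← hp, hpq]
        show PySem.Int.floordiv (st.2.1 * b) b = st.2.1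
        have : PySem.Int.floordiv (st.2.1 * b) b = Int.fdiv (st.2.1 * b) b := rfl
        rw [this, mul_comm, Int.mul_fdiv_cancel_left _ (by omega)]
  · have hctr : ¬ PySem.Int.mod ((neg.length : Int)) 2 ≠ 0 := by
      have : neg.length % 2 = 0 := by omega
      rw [hmod, this]; norm_num
    rw [if_neg hctr]
    have hob : st.2.2.1 = false := by rw [ho]; simp [hodd]
    rw [hob]
    simp [hp]

-- ===== VERDICT (by name: the statement is the Claim_ definition above) =====
-- (theorem ex047_spec above is the verdict)
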